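-- pv_equiv track=rewrite | github.com/GroguLovesCookies/MinecraftModdingTool | java_editor/editor.py | findBackwardsBracket
-- ===== SOURCE A (Python) =====
-- def findBackwardsBracket(text, index, start="(", end=")"):
--     bracket_no = 1
--     while index > 0 and bracket_no > 0:
--         index -= 1
--         char = text[index]
--         if char == start:
--             bracket_no -= 1
--         elif char == end:
--             bracket_no += 1
--
--     if bracket_no == 0:
--         return index
--     return None
-- ===== SOURCE B (Python) =====
-- def findBackwardsBracket(text, index, start="(", end=")"):
--     stack = []
--     for i in range(min(index, len(text))):
--         ch = text[i]
--         if ch == start: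
--             stack.append(i)
--         elif ch == end:
--             if stack:
--                 stack.pop()
--     return stack[-1] if stack else None
-- ===== Notes on version B (the rewrite author's own statement) =====
-- stated objective: alternative
-- what changed: Replaced the backward depth-counter walk from index with a single forward pass over the prefix that maintains an explicit stack of unmatched start-bracket positions and returns its top.
import Mathlib
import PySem

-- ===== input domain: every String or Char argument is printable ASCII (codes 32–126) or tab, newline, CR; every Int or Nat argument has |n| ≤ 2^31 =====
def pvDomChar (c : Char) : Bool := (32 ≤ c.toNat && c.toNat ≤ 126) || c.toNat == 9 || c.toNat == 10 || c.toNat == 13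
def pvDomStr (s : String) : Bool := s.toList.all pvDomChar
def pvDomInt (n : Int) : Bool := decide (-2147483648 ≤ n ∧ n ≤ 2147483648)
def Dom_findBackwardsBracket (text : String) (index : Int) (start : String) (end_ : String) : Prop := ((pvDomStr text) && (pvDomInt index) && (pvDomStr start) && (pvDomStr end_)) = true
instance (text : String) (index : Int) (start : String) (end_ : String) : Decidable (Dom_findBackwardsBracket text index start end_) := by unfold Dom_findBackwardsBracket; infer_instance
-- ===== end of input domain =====

-- B replaces A's backward depth-counter walk with a forward scan keeping a stack of
-- unmatched start positions (objective: alternative decomposition, same cost).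

-- ===== PORT A =====
-- the while loop: state (index, bracket_no); text[index] after the decrement
def findBackwardsBracketLoop (cs : List Char) (start end_ : List Char) (index bno : Int) : Int × Int :=
  if h : 0 < index ∧ 0 < bno then
    match PySem.List.pyGet? cs (index - 1) with
    | none => (index - 1, bno)  -- Python raises IndexError here; excluded by Pre_
    | some c =>
      if [c] = start then findBackwardsBracketLoop cs start end_ (index - 1) (bno - 1)
      else if [c] = end_ then findBackwardsBracketLoop cs start end_ (index - 1) (bno + 1)
      else findBackwardsBracketLoop cs start end_ (index - 1) bno
  else (index, bno)
termination_by index.toNat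
decreasing_by all_goals omega

def findBackwardsBracket (text : String) (index : Int) (start : String) (end_ : String) : Option Int :=
  let r := findBackwardsBracketLoop text.toList start.toList end_.toList index 1
  if r.2 = 0 then some r.1 else none

-- ===== PORT B =====
-- one forward step of Source B's loop body: push the position on start, pop (if non-empty) on end
def findBackwardsBracketStep (start end_ : List Char) (st : List Int) (i : Int) (c : Char) : List Int :=
  if [c] = start then st ++ [i]
  else if [c] = end_ then (if st = [] then st else st.dropLast)
  else st

def findBackwardsBracket_alt (text : String) (index : Int) (start : String) (end_ : String) : Option Int :=
  let cs := text.toList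
  let stack := (PySem.List.pyRange 0 (min index (cs.length : Int)) 1).foldl
    (fun st i =>
      match PySem.List.pyGet? cs i with
      | some c => findBackwardsBracketStep start.toList end_.toList st i c
      | none => st)  -- unreachable: i < min index len
    ([] : List Int)
  stack.getLast?

-- ===== PRECONDITION & SPEC =====
-- Pre_ excludes exactly the inputs where A raises IndexError (it reads text[index-1] with index-1 ≥ len(text))
def Pre_findBackwardsBracket (text : String) (index : Int) (start : String) (end_ : String) : Prop :=
  index ≤ (text.toList.length : Int)
instance (text : String) (index : Int) (start : String) (end_ : String) : Decidable (Pre_findBackwardsBracket text index start end_) := by unfold Pre_findBackwardsBracket; infer_instance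

def pvWitness_findBackwardsBracket : String × Int × String × String := ("()", 1, "(", ")")

def Spec_findBackwardsBracket (text : String) (index : Int) (start : String) (end_ : String) (out : Option Int) : Prop := out = findBackwardsBracket_alt text index start end_
instance (text : String) (index : Int) (start : String) (end_ : String) (out : Option Int) : Decidable (Spec_findBackwardsBracket text index start end_ out) := by unfold Spec_findBackwardsBracket; infer_instance

-- ===== CLAIM (what is proved, stated in full; the proofs are below) =====
def Claim_equal_findBackwardsBracket : Prop := ∀ (text : String) (index : Int) (start : String) (end_ : String), Dom_findBackwardsBracket text index start end_ → Pre_findBackwardsBracket text index start end_ → Spec_findBackwardsBracket text index start end_ (findBackwardsBracket text index start end_)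

-- ===== LEMMAS AND PROOFS =====

-- the stack after forward-scanning the first m characters
def pvStack (cs start end_ : List Char) (m : Int) : List Int :=
  (PySem.List.pyRange 0 m 1).foldl
    (fun st i =>
      match PySem.List.pyGet? cs i with
      | some c => findBackwardsBracketStep start end_ st i c
      | none => st)
    ([] : List Int)

lemma pvStack_succ (cs start end_ : List Char) (n : Nat) (hn : (n : Int) < cs.length) :
    pvStack cs start end_ ((n : Int) + 1)
      = findBackwardsBracketStep start end_ (pvStack cs start end_ (n : Int)) (n : Int) (cs[n]'(by exact_mod_cast hn)) := by
  unfold pvStack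
  rw [PySem.List.pyRange_one_succ_right (by positivity), List.foldl_append]
  simp [PySem.List.pyGet?_natCast, List.getElem?_eq_getElem (show n < cs.length by exact_mod_cast hn)]

-- main invariant: the backward counter walk from position n with counter b lands on the
-- b-th unmatched start position from the top of the forward stack (counter 0), and stays
-- positive if the stack is shorter than b.
lemma pvMain (cs start end_ : List Char) : ∀ (n : Nat), (n : Int) ≤ cs.length → ∀ b : Int, 1 ≤ b →
    (b ≤ ((pvStack cs start end_ n).length : Int) →
      findBackwardsBracketLoop cs start end_ n b
        = ((pvStack cs start end_ n).getD ((pvStack cs start end_ n).length - b.toNat) 0, 0)) ∧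
    (((pvStack cs start end_ n).length : Int) < b →
      0 < (findBackwardsBracketLoop cs start end_ n b).2) := by
  intro n
  induction n with
  | zero =>
    intro _ b hb
    constructor
    · intro hle
      simp [pvStack, PySem.List.pyRange] at hle
      omega
    · intro _
      rw [findBackwardsBracketLoop]
      simp only [Nat.cast_zero]
      rw [dif_neg (by omega)]
      exact hb
  | succ n ih =>
    intro hlen b hb
    have hn : (n : Int) < cs.length := by push_cast at hlen ⊢; omega
    have hget : PySem.List.pyGet? cs ((n : Int) + 1 - 1) = some (cs[n]'(by exact_mod_cast hn)) := by
      simp [PySem.List.pyGet?_natCast, List.getElem?_eq_getElem (show n < cs.length by exact_mod_cast hn)]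
    have hstep := pvStack_succ cs start end_ n hn
    have hloop : findBackwardsBracketLoop cs start end_ ((n : Nat) + 1 : Nat) b
        = (if [cs[n]'(by exact_mod_cast hn)] = start then
             findBackwardsBracketLoop cs start end_ n (b - 1)
           else if [cs[n]'(by exact_mod_cast hn)] = end_ then
             findBackwardsBracketLoop cs start end_ n (b + 1)
           else findBackwardsBracketLoop cs start end_ n b) := by
      rw [findBackwardsBracketLoop]
      rw [dif_pos (by constructor <;> [push_cast; skip] <;> omega)]
      push_cast
      rw [hget]
      have : (n : Int) + 1 - 1 = (n : Int) := by ring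
      rw [this]
    set c := cs[n]'(by exact_mod_cast hn) with hc
    have hS : pvStack cs start end_ ((n : Nat) + 1 : Nat)
        = findBackwardsBracketStep start end_ (pvStack cs start end_ n) (n : Int) c := by
      push_cast
      exact hstep
    set L := pvStack cs start end_ (n : Nat) with hL
    have ihn := ih (by push_cast at hlen ⊢; omega)
    by_cases h1 : [c] = start
    · -- push: stack grows by one at the top
      have hS' : pvStack cs start end_ ((n : Nat) + 1 : Nat) = L ++ [(n : Int)] := by
        rw [hS, findBackwardsBracketStep, if_pos h1]
      rw [hS', hloop, if_pos h1]
      constructor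
      · intro hle
        simp only [List.length_append, List.length_cons, List.length_nil] at hle ⊢
        by_cases hb1 : b = 1
        · subst hb1
          rw [findBackwardsBracketLoop]
          rw [dif_neg (by omega)]
          have : L.length + 1 - (1 : Int).toNat = L.length := by omega
          rw [this]
          simp
        · have hb2 : 2 ≤ b := by omega
          have := (ihn (b - 1) (by omega)).1 (by push_cast at hle ⊢; omega)
          rw [this]
          congr 1
          have hidx : L.length + 1 - b.toNat < L.length := by omega
          rw [List.getD_append _ _ _ _ (by omega)]
          congr 1
          omega
      · intro hlt
        simp only [List.length_append, List.length_cons, List.length_nil] at hlt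
        exact (ihn (b - 1) (by omega)).2 (by push_cast at hlt ⊢; omega)
    · by_cases h2 : [c] = end_
      · -- pop (no-op on the empty stack)
        have hS' : pvStack cs start end_ ((n : Nat) + 1 : Nat)
            = (if L = [] then L else L.dropLast) := by
          rw [hS, findBackwardsBracketStep, if_neg h1, if_pos h2]
        rw [hS', hloop, if_neg h1, if_pos h2]
        by_cases hnil : L = []
        · rw [if_pos hnil]
          constructor
          · intro hle
            simp [hnil] at hle
            omega
          · intro _
            exact (ihn (b + 1) (by omega)).2 (by simp [hnil]; omega)
        · rw [if_neg hnil]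
          have hL1 : 1 ≤ L.length := by have := List.length_pos_of_ne_nil hnil; omega
          constructor
          · intro hle
            simp only [List.length_dropLast] at hle ⊢
            have := (ihn (b + 1) (by omega)).1 (by omega)
            rw [this]
            congr 1
            have hidx : L.length - 1 - b.toNat < L.length - 1 := by omega
            have heq : L.length - (b + 1).toNat = L.length - 1 - b.toNat := by omega
            simp only [List.getD_eq_getElem?_getD]
            rw [List.getElem?_dropLast, if_pos hidx, heq]
          · intro hlt
            simp only [List.length_dropLast] at hlt
            exact (ihn (b + 1) (by omega)).2 (by omega)
      · -- other character: nothing changes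
        have hS' : pvStack cs start end_ ((n : Nat) + 1 : Nat) = L := by
          rw [hS, findBackwardsBracketStep, if_neg h1, if_neg h2]
        rw [hS', hloop, if_neg h1, if_neg h2]
        exact ihn b hb

-- ===== VERDICT (by name: the statement is the Claim_ definition above) =====
theorem findBackwardsBracket_spec : Claim_equal_findBackwardsBracket := by
  unfold Claim_equal_findBackwardsBracket
  intro text index start end_ _ hpre
  unfold Spec_findBackwardsBracket Pre_findBackwardsBracket at *
  have hmin : min index (text.toList.length : Int) = index := min_eq_left hpre
  simp only [findBackwardsBracket, findBackwardsBracket_alt, hmin]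
  by_cases hpos : 0 < index
  · -- index = n for a Nat n with n ≤ len
    obtain ⟨n, rfl⟩ : ∃ n : Nat, index = (n : Int) := ⟨index.toNat, by omega⟩
    have hmain := pvMain text.toList start.toList end_.toList n hpre 1 le_rfl
    show (if (findBackwardsBracketLoop text.toList start.toList end_.toList n 1).2 = 0 then
            some (findBackwardsBracketLoop text.toList start.toList end_.toList n 1).1 else none)
          = (pvStack text.toList start.toList end_.toList n).getLast?
    set L := pvStack text.toList start.toList end_.toList n with hL
    by_cases hnil : L = []
    · have := hmain.2 (by simp [hnil])
      rw [if_neg (by omega), hnil, List.getLast?_nil]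
    · have hL1 : 1 ≤ L.length := by have := List.length_pos_of_ne_nil hnil; omega
      have := hmain.1 (by exact_mod_cast hL1)
      rw [this]
      simp only [Int.toNat_one]
      rw [List.getLast?_eq_getElem?, List.getElem?_eq_getElem (by omega : L.length - 1 < L.length),
          List.getD_eq_getElem?_getD, List.getElem?_eq_getElem (by omega : L.length - 1 < L.length)]
      simp
  · -- index ≤ 0: A's loop never runs (None); B scans the empty range (None)
    rw [findBackwardsBracketLoop, dif_neg (by omega)]
    rw [if_neg (by omega)]
    rw [PySem.List.pyRange_one_eq_nil (by omega)]
    simp
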